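-- pv_equiv track=rewrite | github.com/huyraestevao/ogum-ml | ogum-ml-lite/ogum_lite/segmentation.py | _iter_endpoints
-- ===== SOURCE A (Python) =====
-- from typing import Iterable, List, Sequence
--
-- def _iter_endpoints(
--     n_points: int, n_segments: int, min_size: int
-- ) -> Iterable[list[int]]:
--     if n_segments <= 0:
--         raise ValueError("n_segments must be positive")
--     if min_size <= 0:
--         raise ValueError("min_size must be positive")
--
--     def backtrack(start: int, remaining: int, acc: List[int]) -> Iterable[list[int]]:
--         if remaining == 1:
--             if n_points - start >= min_size:
--                 yield [*acc, n_points]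
--             return
--         max_end = n_points - min_size * (remaining - 1)
--         for end in range(start + min_size, max_end + 1):
--             yield from backtrack(end, remaining - 1, [*acc, end])
--
--     return backtrack(0, n_segments, [])
-- ===== SOURCE B (Python) =====
-- from itertools import combinations_with_replacement
-- from typing import Iterable, List
--
--
-- def _iter_endpoints(
--     n_points: int, n_segments: int, min_size: int
-- ) -> Iterable[list[int]]:
--     if n_segments <= 0:
--         raise ValueError("n_segments must be positive")
--     if min_size <= 0:
--         raise ValueError("min_size must be positive")
--
--     slack = n_points - n_segments * min_size
--
--     def gen() -> Iterable[list[int]]: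
--         if slack < 0:
--             return
--         for cuts in combinations_with_replacement(range(slack + 1), n_segments - 1):
--             yield [c + (i + 1) * min_size for i, c in enumerate(cuts)] + [n_points]
--
--     return gen()
-- ===== Notes on version B (the rewrite author's own statement) =====
-- stated objective: alternative
-- what changed: Replaces the recursive backtracking generator by a direct combinatorial enumeration: nondecreasing cut offsets from combinations_with_replacement(range(slack+1), n_segments-1) are affinely mapped to endpoint lists, yielding the same lists in the same lexicographic order.
import Mathlib
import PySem

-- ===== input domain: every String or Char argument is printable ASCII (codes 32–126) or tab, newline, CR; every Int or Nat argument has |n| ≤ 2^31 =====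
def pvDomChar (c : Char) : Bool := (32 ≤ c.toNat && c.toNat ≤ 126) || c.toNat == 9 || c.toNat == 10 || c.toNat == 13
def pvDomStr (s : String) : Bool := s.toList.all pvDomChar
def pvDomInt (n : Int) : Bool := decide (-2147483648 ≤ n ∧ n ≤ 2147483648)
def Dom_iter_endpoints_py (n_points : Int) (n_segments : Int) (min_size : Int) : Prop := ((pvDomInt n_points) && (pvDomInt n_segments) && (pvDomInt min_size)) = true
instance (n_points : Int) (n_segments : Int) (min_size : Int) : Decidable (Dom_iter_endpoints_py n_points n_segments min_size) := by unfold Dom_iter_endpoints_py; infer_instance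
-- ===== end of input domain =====

-- B replaces A's recursive backtracking generator by a direct enumeration of nondecreasing
-- cut offsets (combinations-with-replacement) mapped affinely to endpoint lists; same lists,
-- same order (objective: alternative decomposition, same cost).

-- ===== PORT A =====
-- Python's `remaining` is an int that is ≥ 1 on every call reachable under Pre_;
-- it is ported as a Nat with `0 => []` for the (then unreachable) remaining ≤ 0 case.
def pvBacktrackA (n m : Int) (start : Int) (remaining : Nat) (acc : List Int) : List (List Int) :=
  match remaining with
  | 0 => []
  | 1 => if m ≤ n - start then [acc ++ [n]] else []
  | r + 2 =>
      -- max_end = n_points - min_size * (remaining - 1); for end in range(start+min_size, max_end+1): yield from …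
      (PySem.List.pyRange (start + m) (n - m * ((r : Int) + 1) + 1) 1).foldl
        (fun out e => out ++ pvBacktrackA n m e (r + 1) (acc ++ [e])) []

def iter_endpoints_py (n_points : Int) (n_segments : Int) (min_size : Int) : List (List Int) :=
  if n_segments ≤ 0 then []        -- Python: raise ValueError (excluded by Pre_)
  else if min_size ≤ 0 then []     -- Python: raise ValueError (excluded by Pre_)
  else pvBacktrackA n_points min_size 0 n_segments.toNat []

-- ===== PORT B =====
-- itertools.combinations_with_replacement(xs, r), in the order itertools yields it
def pvCWR (xs : List Int) (r : Nat) : List (List Int) :=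
  match r, xs with
  | 0, _ => [[]]
  | _ + 1, [] => []
  | r + 1, x :: rest => (pvCWR (x :: rest) r).map (x :: ·) ++ pvCWR rest (r + 1)
  termination_by (r, xs.length)

def iter_endpoints_py_alt (n_points : Int) (n_segments : Int) (min_size : Int) : List (List Int) :=
  if n_segments ≤ 0 then []        -- Python: raise ValueError (excluded by Pre_)
  else if min_size ≤ 0 then []     -- Python: raise ValueError (excluded by Pre_)
  else
    let slack := n_points - n_segments * min_size
    if slack < 0 then []
    else
      (pvCWR (PySem.List.pyRange 0 (slack + 1) 1) (n_segments - 1).toNat).map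
        (fun cuts =>
          (PySem.List.enumerate cuts 0).map (fun p => p.2 + (p.1 + 1) * min_size) ++ [n_points])

-- ===== PRECONDITION & SPEC =====
-- Pre_ excludes exactly the inputs on which A raises ValueError (non-positive n_segments or min_size).
def Pre_iter_endpoints_py (n_points : Int) (n_segments : Int) (min_size : Int) : Prop :=
  0 < n_segments ∧ 0 < min_size
instance (n_points : Int) (n_segments : Int) (min_size : Int) : Decidable (Pre_iter_endpoints_py n_points n_segments min_size) := by unfold Pre_iter_endpoints_py; infer_instance

def pvWitness_iter_endpoints_py : Int × Int × Int := (7, 2, 2)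

def Spec_iter_endpoints_py (n_points : Int) (n_segments : Int) (min_size : Int) (out : List (List Int)) : Prop := out = iter_endpoints_py_alt n_points n_segments min_size
instance (n_points : Int) (n_segments : Int) (min_size : Int) (out : List (List Int)) : Decidable (Spec_iter_endpoints_py n_points n_segments min_size out) := by unfold Spec_iter_endpoints_py; infer_instance

-- ===== CLAIM (what is proved, stated in full; the proofs are below) =====
def Claim_equal_iter_endpoints_py : Prop := ∀ (n_points : Int) (n_segments : Int) (min_size : Int), Dom_iter_endpoints_py n_points n_segments min_size → Pre_iter_endpoints_py n_points n_segments min_size → Spec_iter_endpoints_py n_points n_segments min_size (iter_endpoints_py n_points n_segments min_size)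

-- ===== LEMMAS AND PROOFS =====

lemma pvRange_shift (a b t : Int) :
    PySem.List.pyRange (a + t) (b + t) 1 = (PySem.List.pyRange a b 1).map (· + t) := by
  simp only [PySem.List.pyRange_one, List.map_map]
  have h : b + t - (a + t) = b - a := by ring
  rw [h]
  apply List.map_congr_left
  intro k _
  simp only [Function.comp_apply]
  ring

lemma pvCWR_range_succ (r : Nat) :
    ∀ (len : Nat) (a b : Int), (b - a).toNat = len →
      pvCWR (PySem.List.pyRange a b 1) (r + 1)
        = (PySem.List.pyRange a b 1).flatMap (fun c => (pvCWR (PySem.List.pyRange c b 1) r).map (c :: ·)) := by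
  intro len
  induction len with
  | zero =>
      intro a b h
      rw [PySem.List.pyRange_one_eq_nil (by omega)]
      simp [pvCWR]
  | succ len ih =>
      intro a b h
      have hab : a < b := by omega
      rw [PySem.List.pyRange_one_cons hab]
      rw [pvCWR]
      rw [ih (a + 1) b (by omega), List.flatMap_cons, ← PySem.List.pyRange_one_cons hab]

lemma pvMain (n m : Int) :
    ∀ (r : Nat) (i : Nat) (a : Int) (acc : List Int),
      a ≤ n - ((i : Int) + (r : Int) + 1) * m →
      pvBacktrackA n m (a + (i : Int) * m) (r + 1) acc
        = (pvCWR (PySem.List.pyRange a (n - ((i : Int) + (r : Int) + 1) * m + 1) 1) r).map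
            (fun d => acc ++ (PySem.List.enumerate d (i : Int)).map (fun p => p.2 + (p.1 + 1) * m) ++ [n]) := by
  intro r
  induction r with
  | zero =>
      intro i a acc ha
      show (if m ≤ n - (a + (i:Int) * m) then [acc ++ [n]] else []) = _
      rw [if_pos (by push_cast at ha ⊢; linarith)]
      simp [pvCWR, PySem.List.enumerate_nil]
  | succ r ih =>
      intro i a acc ha
      have hcr : ((r + 1 : Nat) : Int) = (r : Int) + 1 := by push_cast; ring
      rw [hcr] at ha ⊢
      show (PySem.List.pyRange (a + (i:Int) * m + m) (n - m * ((r : Int) + 1) + 1) 1).foldl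
              (fun out e => out ++ pvBacktrackA n m e (r + 1) (acc ++ [e])) [] = _
      rw [PySem.List.foldl_append_eq_flatMap, List.nil_append]
      have hrange :
          PySem.List.pyRange (a + (i:Int) * m + m) (n - m * ((r : Int) + 1) + 1) 1
            = (PySem.List.pyRange a (n - ((i : Int) + ((r:Int) + 1) + 1) * m + 1) 1).map (· + ((i:Int) + 1) * m) := by
        have h1 : a + (i:Int) * m + m = a + ((i:Int) + 1) * m := by ring
        have h2 : n - m * ((r : Int) + 1) + 1
            = (n - ((i : Int) + ((r:Int) + 1) + 1) * m + 1) + ((i:Int) + 1) * m := by ring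
        rw [h1, h2, pvRange_shift]
      rw [hrange, List.flatMap_map]
      rw [pvCWR_range_succ r ((n - ((i : Int) + ((r:Int) + 1) + 1) * m + 1) - a).toNat a _ rfl,
          List.map_flatMap]
      apply List.flatMap_congr
      intro c hc
      have hcB : c ≤ n - (((i:Int) + 1) + (r:Int) + 1) * m := by
        have := (PySem.List.mem_pyRange_one.mp hc).2
        linarith
      have hIH := ih (i + 1) c (acc ++ [c + ((i:Int) + 1) * m]) (by push_cast; push_cast at hcB; linarith)
      have hcast : ((i + 1 : Nat) : Int) = (i : Int) + 1 := by push_cast; ring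
      rw [hcast] at hIH
      have hB : n - (((i:Int) + 1) + (r:Int) + 1) * m + 1 = n - ((i : Int) + ((r:Int) + 1) + 1) * m + 1 := by ring
      rw [hB] at hIH
      rw [hIH, List.map_map]
      apply List.map_congr_left
      intro d _
      simp only [Function.comp_apply, PySem.List.enumerate_cons, List.map_cons, List.append_assoc,
        List.cons_append, List.nil_append]

-- A = B when slack < 0: A's first range is empty (k ≥ 2) or the single guard fails (k = 1)
lemma pvEmpty (n m k : Int) (hk : 0 < k) (hneg : n - k * m < 0) :
    pvBacktrackA n m 0 k.toNat [] = [] := by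
  have hk1 : 1 ≤ k.toNat := by omega
  rcases Nat.exists_eq_add_of_le hk1 with ⟨j, hj⟩
  match j, hj with
  | 0, hj =>
      rw [hj]
      show (if m ≤ n - 0 then [([] : List Int) ++ [n]] else []) = []
      have hk1' : k = 1 := by omega
      rw [hk1'] at hneg
      rw [if_neg (by omega)]
  | j + 1, hj =>
      rw [show (1 + (j+1)) = j + 2 by omega] at hj
      rw [hj]
      show (PySem.List.pyRange (0 + m) (n - m * ((j : Int) + 1) + 1) 1).foldl
              (fun out e => out ++ pvBacktrackA n m e (j + 1) ([] ++ [e])) [] = []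
      rw [PySem.List.pyRange_one_eq_nil]
      · rfl
      · have hkeq : ((j : Int) + 2) = k := by omega
        have h1 : (j : Int) + 1 = k - 1 := by omega
        rw [h1]
        have h2 : m * (k - 1) = m * k - m := by ring
        have h3 : m * k = k * m := by ring
        omega

-- ===== VERDICT (by name: the statement is the Claim_ definition above) =====
theorem iter_endpoints_py_spec : Claim_equal_iter_endpoints_py := by
  intro n k m _ hPre
  obtain ⟨hk, hm⟩ := hPre
  unfold Spec_iter_endpoints_py iter_endpoints_py iter_endpoints_py_alt
  rw [if_neg (by omega), if_neg (by omega), if_neg (by omega), if_neg (by omega)]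
  simp only []
  by_cases hneg : n - k * m < 0
  · rw [if_pos hneg, pvEmpty n m k hk hneg]
  · rw [if_neg hneg]
    have hk1 : 1 ≤ k.toNat := by omega
    have hkk : (k.toNat : Int) = k := by omega
    have hrk : k.toNat - 1 + 1 = k.toNat := by omega
    have hr' : (k - 1).toNat = k.toNat - 1 := by omega
    have h := pvMain n m (k.toNat - 1) 0 0 []
      (by rw [show ((k.toNat - 1 : Nat) : Int) = k - 1 by omega]; push_cast; linarith)
    rw [hrk] at h
    rw [show (0 : Int) + (0 : Nat) * m = 0 by push_cast; ring] at h
    have hbnd : ((k.toNat - 1 : Nat) : Int) = k - 1 := by omega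
    rw [hbnd] at h
    rw [show n - ((0:Nat) + (k - 1) + 1) * m + 1 = n - k * m + 1 by push_cast; ring] at h
    rw [h, hr']
    apply List.map_congr_left
    intro d _
    simp
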